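-- pv_equiv track=rewrite | github.com/LoboAnimae/Computer-Graphics | Lab_2.5_Filling_Polygon/lib/contourcounter.py | greatercounter
-- ===== SOURCE A (Python) =====
-- def greatercounter(contourp:list, point:list, index:int):
--     """Allows to know the number of points in front of the given point.
--
--     Args:
--         contourp (list): List of all the points
--         point (list): X-Y-Values array of a singular point
--         index (int): 0 if working on X. 1 if working on Y.
--
--     Returns:
--         int: How many are behind, how many are in front
--     """
--     cless = set()
--     cmore = set()
--
--     ops = 0 if index == 1 else 1
--
--     for cpoint in contourp:
--         if cpoint[ops] == point[ops]:
--             if cpoint[index] < point[index]: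
--                 cless.add(cpoint[index])
--             if cpoint[index] > point[index]:
--                 cmore.add(cpoint[index])
--
--     return len(cless), len(cmore)
-- ===== SOURCE B (Python) =====
-- def greatercounter(contourp: list, point: list, index: int):
--     ops = 0 if index == 1 else 1
--     vals = sorted(c[index] for c in contourp if c[ops] == point[ops])
--     cless = cmore = 0
--     prev = None
--     for v in vals:
--         if prev is not None and v == prev:
--             continue
--         prev = v
--         if v < point[index]:
--             cless += 1
--         elif v > point[index]:
--             cmore += 1
--     return cless, cmore
-- ===== Notes on version B (the rewrite author's own statement) =====
-- stated objective: alternative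
-- what changed: B sorts the matching coordinate values and counts below/above in one scan that skips adjacent duplicates (sort-then-scan dedup), instead of A's single pass growing two hash sets and taking their sizes.
import Mathlib
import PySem

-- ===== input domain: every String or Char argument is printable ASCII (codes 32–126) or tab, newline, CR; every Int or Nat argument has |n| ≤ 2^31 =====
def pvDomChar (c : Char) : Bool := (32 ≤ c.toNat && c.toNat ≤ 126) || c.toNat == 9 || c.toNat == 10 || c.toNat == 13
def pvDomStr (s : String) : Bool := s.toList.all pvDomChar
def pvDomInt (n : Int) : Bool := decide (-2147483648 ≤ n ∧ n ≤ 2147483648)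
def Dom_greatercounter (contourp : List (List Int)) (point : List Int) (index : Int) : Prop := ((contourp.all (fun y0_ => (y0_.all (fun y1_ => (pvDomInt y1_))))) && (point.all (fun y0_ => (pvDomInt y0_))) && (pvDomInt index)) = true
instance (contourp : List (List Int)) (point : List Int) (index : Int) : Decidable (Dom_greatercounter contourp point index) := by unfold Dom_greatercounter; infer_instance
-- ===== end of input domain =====

-- B replaces A's two hash-set-growing passes by sort-then-scan: it sorts the matching
-- coordinate values and counts below/above in one scan that skips adjacent duplicates
-- (objective: alternative; duplicates are adjacent after sorting, so each distinct
-- value is counted exactly once, matching A's set cardinalities).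

-- ===== PORT A =====
def greatercounter (contourp : List (List Int)) (point : List Int) (index : Int) : Int × Int :=
  -- cless = set(); cmore = set(); ops = 0 if index == 1 else 1
  let ops : Int := if index = 1 then 0 else 1
  -- for cpoint in contourp: …  (indexing via pyGetD; in range under Pre_)
  let st := contourp.foldl (fun (st : PySem.Set Int × PySem.Set Int) cpoint =>
    if PySem.List.pyGetD cpoint ops 0 = PySem.List.pyGetD point ops 0 then
      let st1 := if PySem.List.pyGetD cpoint index 0 < PySem.List.pyGetD point index 0 then
          (PySem.Set.add st.1 (PySem.List.pyGetD cpoint index 0), st.2) else st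
      if PySem.List.pyGetD cpoint index 0 > PySem.List.pyGetD point index 0 then
          (st1.1, PySem.Set.add st1.2 (PySem.List.pyGetD cpoint index 0)) else st1
    else st) (PySem.Set.empty, PySem.Set.empty)
  (PySem.Set.len st.1, PySem.Set.len st.2)

-- ===== PORT B =====
def greatercounter_alt (contourp : List (List Int)) (point : List Int) (index : Int) : Int × Int :=
  let ops : Int := if index = 1 then 0 else 1
  -- vals = sorted(c[index] for c in contourp if c[ops] == point[ops])
  let vals : List Int := PySem.List.sorted
    ((contourp.filter
        (fun c => decide (PySem.List.pyGetD c ops 0 = PySem.List.pyGetD point ops 0))).map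
      (fun c => PySem.List.pyGetD c index 0)) (fun v => v) false
  -- cless = cmore = 0; prev = None; for v in vals: skip adjacent duplicate, else count
  let st := vals.foldl (fun (st : Option Int × Int × Int) v =>
    if st.1 = some v then st        -- if prev is not None and v == prev: continue
    else if v < PySem.List.pyGetD point index 0 then (some v, st.2.1 + 1, st.2.2)
    else if v > PySem.List.pyGetD point index 0 then (some v, st.2.1, st.2.2 + 1)
    else (some v, st.2.1, st.2.2)) (none, 0, 0)
  (st.2.1, st.2.2)

-- ===== PRECONDITION & SPEC =====
-- Pre_ excludes exactly the inputs where Python A raises IndexError: some accessed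
-- cpoint[ops], point[ops], cpoint[index] or point[index] is out of range.
def Pre_greatercounter (contourp : List (List Int)) (point : List Int) (index : Int) : Prop :=
  let ops : Int := if index = 1 then 0 else 1
  (∀ c ∈ contourp, PySem.Raise.InRange c.length ops) ∧
  (contourp ≠ [] → PySem.Raise.InRange point.length ops) ∧
  (∀ c ∈ contourp, PySem.List.pyGetD c ops 0 = PySem.List.pyGetD point ops 0 →
      PySem.Raise.InRange c.length index ∧ PySem.Raise.InRange point.length index)
instance (contourp : List (List Int)) (point : List Int) (index : Int) : Decidable (Pre_greatercounter contourp point index) := by unfold Pre_greatercounter; infer_instance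

def pvWitness_greatercounter : List (List Int) × List Int × Int := ([[0, 1], [2, 1], [2, 1]], [1, 1], 0)

def Spec_greatercounter (contourp : List (List Int)) (point : List Int) (index : Int) (out : Int × Int) : Prop := out = greatercounter_alt contourp point index
instance (contourp : List (List Int)) (point : List Int) (index : Int) (out : Int × Int) : Decidable (Spec_greatercounter contourp point index out) := by unfold Spec_greatercounter; infer_instance

-- ===== CLAIM (what is proved, stated in full; the proofs are below) =====
def Claim_equal_greatercounter : Prop := ∀ (contourp : List (List Int)) (point : List Int) (index : Int), Dom_greatercounter contourp point index → Pre_greatercounter contourp point index → Spec_greatercounter contourp point index (greatercounter contourp point index)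

-- ===== LEMMAS AND PROOFS =====

-- ---- A-side: the two-set fold counts distinct filtered values below/above the pivot ----

-- a guarded foldl is a foldl over the filtered list
theorem pv_foldl_filter_if {α σ : Type} {P : α → Prop} [DecidablePred P]
    (g : σ → α → σ) (L : List α) (s : σ) :
    L.foldl (fun s c => if P c then g s c else s) s
      = (L.filter (fun c => decide (P c))).foldl g s := by
  induction L generalizing s with
  | nil => rfl
  | cons c L ih => by_cases h : P c <;> simp [h, ih]

-- distinct elements of a filtered list are as many as filtered distinct elements
theorem pv_ofList_filter_length (q : Int → Bool) (vs : List Int) :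
    (PySem.Set.ofList (vs.filter q)).length = ((PySem.Set.ofList vs).filter q).length := by
  apply List.Perm.length_eq
  apply (List.perm_ext_iff_of_nodup (PySem.Set.nodup_ofList _)
    ((PySem.Set.nodup_ofList vs).filter q)).mpr
  intro a
  simp [PySem.Set.mem_ofList, List.mem_filter]

-- one guarded-set-add pass equals ofList of the filtered values
theorem pv_foldl_add_if (P : Int → Prop) [DecidablePred P] (vs : List Int) :
    vs.foldl (fun (s : PySem.Set Int) v => if P v then PySem.Set.add s v else s) []
      = PySem.Set.ofList (vs.filter (fun v => decide (P v))) := by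
  rw [pv_foldl_filter_if, PySem.Set.ofList_eq_foldl]

theorem pv_AB (m : List Int → Prop) [DecidablePred m] (f : List Int → Int) (p : Int)
    (L : List (List Int)) :
    ((PySem.Set.len (L.foldl (fun (st : PySem.Set Int × PySem.Set Int) c =>
        if m c then
          let st1 := if f c < p then (PySem.Set.add st.1 (f c), st.2) else st
          if f c > p then (st1.1, PySem.Set.add st1.2 (f c)) else st1
        else st) (PySem.Set.empty, PySem.Set.empty)).1 : Int),
     (PySem.Set.len (L.foldl (fun (st : PySem.Set Int × PySem.Set Int) c =>
        if m c then
          let st1 := if f c < p then (PySem.Set.add st.1 (f c), st.2) else st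
          if f c > p then (st1.1, PySem.Set.add st1.2 (f c)) else st1
        else st) (PySem.Set.empty, PySem.Set.empty)).2 : Int))
    = (((PySem.Set.ofList ((L.filter (fun c => decide (m c))).map f)).countP
          (fun v => decide (v < p)) : Int),
       ((PySem.Set.ofList ((L.filter (fun c => decide (m c))).map f)).countP
          (fun v => decide (v > p)) : Int)) := by
  show (_, _) = _
  set g1 : PySem.Set Int → List Int → PySem.Set Int :=
    fun s c => if m c then (if f c < p then PySem.Set.add s (f c) else s) else s with hg1
  set g2 : PySem.Set Int → List Int → PySem.Set Int :=
    fun s c => if m c then (if f c > p then PySem.Set.add s (f c) else s) else s with hg2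
  have hstep : (fun (st : PySem.Set Int × PySem.Set Int) c =>
      if m c then
        let st1 := if f c < p then (PySem.Set.add st.1 (f c), st.2) else st
        if f c > p then (st1.1, PySem.Set.add st1.2 (f c)) else st1
      else st)
      = (fun st c => (g1 st.1 c, g2 st.2 c)) := by
    funext st c
    simp only [hg1, hg2]
    by_cases h1 : m c
    · by_cases h2 : f c < p
      · have h3 : ¬ f c > p := by omega
        simp [h1, h2, h3]
      · by_cases h3 : f c > p <;> simp [h1, h2, h3]
    · simp [h1]
  have hfold := PySem.List.foldl_prod_mk g1 g2 L PySem.Set.empty PySem.Set.empty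
  rw [hstep, hfold, hg1, hg2]
  have hcomp : ∀ (Q : Int → Prop) (_ : DecidablePred Q),
      L.foldl (fun (s : PySem.Set Int) c => if m c then (if Q (f c) then PySem.Set.add s (f c) else s) else s) PySem.Set.empty
        = PySem.Set.ofList (((L.filter (fun c => decide (m c))).map f).filter (fun v => decide (Q v))) := by
    intro Q hQ
    rw [pv_foldl_filter_if (P := m)
      (g := fun (s : PySem.Set Int) c => if Q (f c) then PySem.Set.add s (f c) else s),
      ← List.foldl_map (f := f)
      (g := fun (s : PySem.Set Int) v => if Q v then PySem.Set.add s v else s)]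
    exact pv_foldl_add_if Q _
  simp only [hcomp (fun v => v < p) inferInstance, hcomp (fun v => v > p) inferInstance]
  have hlen : ∀ (s : PySem.Set Int), PySem.Set.len s = (s.length : Int) := fun s => rfl
  rw [hlen, hlen]
  simp only [List.countP_eq_length_filter, pv_ofList_filter_length]

-- ---- B-side: the adjacent-duplicate-skipping scan counts distinct values of a sorted list ----

-- the values the scan actually counts (skipping an element equal to the running prev)
def pvAccepted : Option Int → List Int → List Int
  | _, [] => []
  | pr, v :: t => if pr = some v then pvAccepted (some v) t else v :: pvAccepted (some v) t

-- the scan's final prev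
def pvScanPrev : Option Int → List Int → Option Int
  | pr, [] => pr
  | _, v :: t => pvScanPrev (some v) t

-- the scan fold, characterised via pvAccepted
theorem pv_scan (P : Int) (L : List Int) (pr : Option Int) (x y : Int) :
    L.foldl (fun (st : Option Int × Int × Int) v =>
      if st.1 = some v then st
      else if v < P then (some v, st.2.1 + 1, st.2.2)
      else if v > P then (some v, st.2.1, st.2.2 + 1)
      else (some v, st.2.1, st.2.2)) (pr, x, y)
    = (pvScanPrev pr L,
       x + ((pvAccepted pr L).countP (fun v => decide (v < P)) : Int),
       y + ((pvAccepted pr L).countP (fun v => decide (v > P)) : Int)) := by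
  induction L generalizing pr x y with
  | nil => simp [pvAccepted, pvScanPrev]
  | cons v t ih =>
    simp only [List.foldl_cons]
    by_cases hpr : pr = some v
    · subst hpr
      simp [ih, pvAccepted, pvScanPrev]
    · by_cases h1 : v < P
      · have h2 : ¬ v > P := by omega
        simp [hpr, h1, h2, ih, pvAccepted, pvScanPrev]
        omega
      · by_cases h2 : v > P <;>
          simp [hpr, h1, h2, ih, pvAccepted, pvScanPrev] <;> omega

-- on a sorted tail bounded below by a, the accepted values are exactly the distinct values ≠ a
theorem pv_accepted_some (a : Int) (L : List Int) (hs : L.Pairwise (· ≤ ·))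
    (hb : ∀ u ∈ L, a ≤ u) :
    (pvAccepted (some a) L).Nodup ∧ ∀ x, x ∈ pvAccepted (some a) L ↔ (x ∈ L ∧ x ≠ a) := by
  induction L generalizing a with
  | nil => simp [pvAccepted]
  | cons v t ih =>
    rw [List.pairwise_cons] at hs
    have hbt : ∀ u ∈ t, v ≤ u := hs.1
    have hav : a ≤ v := hb v (List.mem_cons_self)
    have iht := ih v hs.2 hbt
    by_cases hv : a = v
    · subst hv
      have : pvAccepted (some a) (a :: t) = pvAccepted (some a) t := by
        simp [pvAccepted]
      rw [this]
      refine ⟨iht.1, fun x => ?_⟩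
      rw [iht.2 x]
      constructor
      · rintro ⟨hx, hxa⟩; exact ⟨List.mem_cons_of_mem _ hx, hxa⟩
      · rintro ⟨hx, hxa⟩
        rcases List.mem_cons.mp hx with h | h
        · exact absurd h hxa
        · exact ⟨h, hxa⟩
    · have hne : (some a : Option Int) ≠ some v := by simpa using hv
      have : pvAccepted (some a) (v :: t) = v :: pvAccepted (some v) t := by
        simp [pvAccepted, hne]
      rw [this]
      have hvlt : a < v := lt_of_le_of_ne hav hv
      constructor
      · refine List.nodup_cons.mpr ⟨?_, iht.1⟩
        intro hmem
        exact ((iht.2 v).mp hmem).2 rfl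
      · intro x
        rw [List.mem_cons, iht.2 x, List.mem_cons]
        constructor
        · rintro (rfl | ⟨hx, _⟩)
          · exact ⟨Or.inl rfl, by omega⟩
          · have := hbt x hx
            exact ⟨Or.inr hx, by omega⟩
        · rintro ⟨rfl | hx, hxa⟩
          · exact Or.inl rfl
          · by_cases hxv : x = v
            · exact Or.inl hxv
            · exact Or.inr ⟨hx, hxv⟩

-- on a sorted list the scan's accepted values are its distinct values
theorem pv_accepted_none (L : List Int) (hs : L.Pairwise (· ≤ ·)) :
    (pvAccepted none L).Nodup ∧ ∀ x, x ∈ pvAccepted none L ↔ x ∈ L := by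
  cases L with
  | nil => simp [pvAccepted]
  | cons v t =>
    rw [List.pairwise_cons] at hs
    have : pvAccepted none (v :: t) = v :: pvAccepted (some v) t := by simp [pvAccepted]
    rw [this]
    have h := pv_accepted_some v t hs.2 hs.1
    constructor
    · refine List.nodup_cons.mpr ⟨fun hmem => ((h.2 v).mp hmem).2 rfl, h.1⟩
    · intro x
      rw [List.mem_cons, h.2 x, List.mem_cons]
      constructor
      · rintro (rfl | ⟨hx, _⟩)
        · exact Or.inl rfl
        · exact Or.inr hx
      · rintro (rfl | hx)
        · exact Or.inl rfl
        · by_cases hxv : x = v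
          · exact Or.inl hxv
          · exact Or.inr ⟨hx, hxv⟩

-- two nodup lists with the same members have the same countP
theorem pv_countP_eq_of_nodup_mem (q : Int → Bool) (L1 L2 : List Int)
    (h1 : L1.Nodup) (h2 : L2.Nodup) (hm : ∀ x, x ∈ L1 ↔ x ∈ L2) :
    L1.countP q = L2.countP q := by
  simp only [List.countP_eq_length_filter]
  apply List.Perm.length_eq
  apply (List.perm_ext_iff_of_nodup (h1.filter q) (h2.filter q)).mpr
  intro a
  simp [List.mem_filter, hm a]

-- B's result is the distinct-value counts of the filtered mapped list
theorem pv_B (m : List Int → Prop) [DecidablePred m] (f : List Int → Int) (p : Int)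
    (L : List (List Int)) :
    (let vals : List Int := PySem.List.sorted
        ((L.filter (fun c => decide (m c))).map f) (fun v => v) false
     let st := vals.foldl (fun (st : Option Int × Int × Int) v =>
        if st.1 = some v then st
        else if v < p then (some v, st.2.1 + 1, st.2.2)
        else if v > p then (some v, st.2.1, st.2.2 + 1)
        else (some v, st.2.1, st.2.2)) (none, 0, 0)
     ((st.2.1, st.2.2) : Int × Int))
    = (((PySem.Set.ofList ((L.filter (fun c => decide (m c))).map f)).countP
          (fun v => decide (v < p)) : Int),
       ((PySem.Set.ofList ((L.filter (fun c => decide (m c))).map f)).countP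
          (fun v => decide (v > p)) : Int)) := by
  set M := (L.filter (fun c => decide (m c))).map f with hM
  set S := PySem.List.sorted M (fun v => v) false with hS
  have hsorted : S.Pairwise (· ≤ ·) := by
    have := PySem.List.sorted_pairwise (xs := M) (key := fun v : Int => v)
    simpa using this
  have hacc := pv_accepted_none S hsorted
  have hmem : ∀ x, x ∈ pvAccepted none S ↔ x ∈ PySem.Set.ofList M := by
    intro x
    rw [hacc.2 x, PySem.Set.mem_ofList]
    exact PySem.List.mem_sorted M (fun v : Int => v) false x
  simp only [pv_scan]
  have hcnt : ∀ q : Int → Bool,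
      (pvAccepted none S).countP q = (PySem.Set.ofList M).countP q := fun q =>
    pv_countP_eq_of_nodup_mem q _ _ hacc.1 (PySem.Set.nodup_ofList M) hmem
  simp [hcnt]

-- ===== VERDICT (by name: the statement is the Claim_ definition above) =====

theorem greatercounter_spec : Claim_equal_greatercounter := by
  intro contourp point index _ _
  unfold Spec_greatercounter greatercounter greatercounter_alt
  rw [pv_AB (fun c => PySem.List.pyGetD c (if index = 1 then 0 else 1) 0
      = PySem.List.pyGetD point (if index = 1 then 0 else 1) 0)
    (fun c => PySem.List.pyGetD c index 0) (PySem.List.pyGetD point index 0) contourp]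
  exact (pv_B (fun c => PySem.List.pyGetD c (if index = 1 then 0 else 1) 0
      = PySem.List.pyGetD point (if index = 1 then 0 else 1) 0)
    (fun c => PySem.List.pyGetD c index 0) (PySem.List.pyGetD point index 0) contourp).symm
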